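-- pv_equiv track=rewrite | github.com/amonty84/Madhav | platform/python-sidecar/rag/chunkers/ucn_section.py | _split_at_h3
-- ===== SOURCE A (Python) =====
-- def _split_at_h3(body: str) -> list[tuple[str, str]]:
--     """Split a section body at H3 (### ) boundaries. Returns [(sub_heading, sub_body)]."""
--     parts: list[tuple[str, str]] = []
--     current_heading = ""
--     current_body: list[str] = []
--
--     for line in body.split("\n"):
--         if line.startswith("### "):
--             if current_body or current_heading:
--                 parts.append((current_heading, "\n".join(current_body)))
--             current_heading = line[4:].strip()
--             current_body = []
--         else:
--             current_body.append(line)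
--
--     if current_body or current_heading:
--         parts.append((current_heading, "\n".join(current_body)))
--     return parts
-- ===== SOURCE B (Python) =====
-- def _find_h3(lines):
--     for i, line in enumerate(lines):
--         if line.startswith("### "):
--             return lines[:i], line, lines[i + 1:]
--     return None
--
--
-- def _segments(heading, lines):
--     found = _find_h3(lines)
--     if found is None:
--         return [(heading, "\n".join(lines))] if (lines or heading) else []
--     pre, bline, rest = found
--     head = [(heading, "\n".join(pre))] if (pre or heading) else []
--     return head + _segments(bline[4:].strip(), rest)
--
--
-- def _split_at_h3(body: str) -> list[tuple[str, str]]: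
--     """Split a section body at H3 (### ) boundaries. Returns [(sub_heading, sub_body)]."""
--     return _segments("", body.split("\n"))
-- ===== Notes on version B (the rewrite author's own statement) =====
-- stated objective: alternative
-- what changed: A's single-pass loop carrying (parts, current_heading, current_body) accumulator state is replaced by a recursive decomposition: find the next H3 boundary line, slice the list there, emit the segment, and recurse on the remainder.
import Mathlib
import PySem

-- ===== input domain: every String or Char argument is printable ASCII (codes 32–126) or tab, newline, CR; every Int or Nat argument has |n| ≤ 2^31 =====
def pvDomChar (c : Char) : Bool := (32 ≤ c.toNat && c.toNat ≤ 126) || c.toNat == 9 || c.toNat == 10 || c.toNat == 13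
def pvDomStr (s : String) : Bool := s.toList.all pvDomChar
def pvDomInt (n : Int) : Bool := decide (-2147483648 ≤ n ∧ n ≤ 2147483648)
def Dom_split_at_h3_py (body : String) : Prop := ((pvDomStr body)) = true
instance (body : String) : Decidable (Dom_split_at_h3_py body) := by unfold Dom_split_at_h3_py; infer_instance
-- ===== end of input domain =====

-- B replaces A's single-pass accumulator loop with a recursive decomposition (find the next
-- H3 boundary, slice, recurse); same return value, objective: alternative structure.

-- ===== PORT A =====
-- loop body of A's for-loop: state = (parts, current_heading, current_body)
def stepA (st : List (String × String) × String × List String) (line : String) :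
    List (String × String) × String × List String :=
  let (parts, ch, cb) := st
  if PySem.Str.startswith line "### " then
    let parts' := if cb ≠ [] ∨ ch ≠ "" then parts ++ [(ch, PySem.Str.join "\n" cb)] else parts
    (parts', PySem.Str.strip (PySem.Str.slice line (some 4) none), ([] : List String))
  else
    (parts, ch, cb ++ [line])

-- the final 'if current_body or current_heading: parts.append(...)'
def finishA (st : List (String × String) × String × List String) : List (String × String) :=
  let (parts, ch, cb) := st
  if cb ≠ [] ∨ ch ≠ "" then parts ++ [(ch, PySem.Str.join "\n" cb)] else parts

def split_at_h3_py (body : String) : List (String × String) :=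
  finishA (((PySem.Chars.splitOn body.toList "\n".toList).map String.ofList).foldl stepA ([], "", []))

-- ===== PORT B =====
-- B helper _find_h3: scan for the first '### ' line, returning (lines before, that line, lines after)
def findH3 : List String → Option (List String × String × List String)
  | [] => none
  | line :: rest =>
    if PySem.Str.startswith line "### " then some ([], line, rest)
    else
      match findH3 rest with
      | none => none
      | some (pre, b, r) => some (line :: pre, b, r)

theorem findH3_lt {lines pre rest : List String} {b : String}
    (h : findH3 lines = some (pre, b, rest)) : rest.length < lines.length := by
  induction lines generalizing pre with
  | nil => simp [findH3] at h
  | cons l ls ih =>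
    simp only [findH3] at h
    split at h
    · cases h; simp
    · cases hf : findH3 ls with
      | none => rw [hf] at h; cases h
      | some v =>
        obtain ⟨p, bb, r⟩ := v
        rw [hf] at h
        cases h
        exact Nat.lt_trans (ih hf) (by simp)

-- B helper _segments
def segmentsB (heading : String) (lines : List String) : List (String × String) :=
  match hf : findH3 lines with
  | none => if lines ≠ [] ∨ heading ≠ "" then [(heading, PySem.Str.join "\n" lines)] else []
  | some (pre, bline, rest) =>
      (if pre ≠ [] ∨ heading ≠ "" then [(heading, PySem.Str.join "\n" pre)] else []) ++
      segmentsB (PySem.Str.strip (PySem.Str.slice bline (some 4) none)) rest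
termination_by lines.length
decreasing_by exact findH3_lt hf

def split_at_h3_py_alt (body : String) : List (String × String) :=
  segmentsB "" ((PySem.Chars.splitOn body.toList "\n".toList).map String.ofList)

-- ===== PRECONDITION & SPEC =====
def Spec_split_at_h3_py (body : String) (out : List (String × String)) : Prop := out = split_at_h3_py_alt body
instance (body : String) (out : List (String × String)) : Decidable (Spec_split_at_h3_py body out) := by unfold Spec_split_at_h3_py; infer_instance

-- ===== CLAIM (what is proved, stated in full; the proofs are below) =====
def Claim_equal_split_at_h3_py : Prop := ∀ (body : String), Dom_split_at_h3_py body → Spec_split_at_h3_py body (split_at_h3_py body)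

-- ===== LEMMAS AND PROOFS =====

-- a list with no '### ' line has no boundary
theorem findH3_none {cb : List String}
    (h : ∀ l ∈ cb, PySem.Str.startswith l "### " = false) : findH3 cb = none := by
  induction cb with
  | nil => rfl
  | cons l ls ih =>
    unfold findH3
    rw [h l (by simp), ih (fun x hx => h x (by simp [hx]))]
    rfl

-- boundary search through a clean prefix finds the head of the suffix
theorem findH3_append {cb : List String} {l : String} {rest : List String}
    (h : ∀ x ∈ cb, PySem.Str.startswith x "### " = false)
    (hl : PySem.Str.startswith l "### " = true) :
    findH3 (cb ++ l :: rest) = some (cb, l, rest) := by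
  induction cb with
  | nil => rw [List.nil_append]; unfold findH3; rw [hl]; rfl
  | cons c cs ih =>
    rw [List.cons_append]
    unfold findH3
    rw [h c (by simp), ih (fun x hx => h x (by simp [hx]))]
    rfl

-- shape lemmas for segmentsB (its own match carries a named discriminant hypothesis)
theorem segmentsB_none {lines : List String} (heading : String)
    (h : findH3 lines = none) :
    segmentsB heading lines =
      if lines ≠ [] ∨ heading ≠ "" then [(heading, PySem.Str.join "\n" lines)] else [] := by
  rw [segmentsB]
  split
  · rfl
  · rename_i heq; rw [h] at heq; cases heq

theorem segmentsB_some {lines pre rest : List String} {bline : String} (heading : String)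
    (h : findH3 lines = some (pre, bline, rest)) :
    segmentsB heading lines =
      (if pre ≠ [] ∨ heading ≠ "" then [(heading, PySem.Str.join "\n" pre)] else []) ++
      segmentsB (PySem.Str.strip (PySem.Str.slice bline (some 4) none)) rest := by
  rw [segmentsB]
  split
  · rename_i heq; rw [h] at heq; cases heq
  · rename_i p b r heq
    rw [h] at heq
    cases heq
    rfl

-- core invariant: A's loop from a clean accumulated state equals B's recursive decomposition
theorem loop_eq (lines : List String) (parts : List (String × String)) (ch : String)
    (cb : List String) (hcb : ∀ l ∈ cb, PySem.Str.startswith l "### " = false) :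
    finishA (lines.foldl stepA (parts, ch, cb)) = parts ++ segmentsB ch (cb ++ lines) := by
  induction lines generalizing parts ch cb with
  | nil =>
    rw [List.foldl_nil, List.append_nil, segmentsB_none ch (findH3_none hcb)]
    show (if cb ≠ [] ∨ ch ≠ "" then parts ++ [(ch, PySem.Str.join "\n" cb)] else parts) = _
    split <;> simp
  | cons l rest ih =>
    rw [List.foldl_cons]
    by_cases hl : PySem.Str.startswith l "### " = true
    · have hstep : stepA (parts, ch, cb) l =
        ((if cb ≠ [] ∨ ch ≠ "" then parts ++ [(ch, PySem.Str.join "\n" cb)] else parts),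
          PySem.Str.strip (PySem.Str.slice l (some 4) none), ([] : List String)) := by
        unfold stepA; rw [hl]; rfl
      rw [hstep, ih _ _ [] (by simp), segmentsB_some ch (findH3_append hcb hl)]
      simp only [List.nil_append]
      split <;> simp
    · rw [Bool.not_eq_true] at hl
      have hstep : stepA (parts, ch, cb) l = (parts, ch, cb ++ [l]) := by
        unfold stepA; rw [hl]; rfl
      rw [hstep, ih _ _ (cb ++ [l])
          (fun x hx => by rcases List.mem_append.1 hx with hm | hm
                          · exact hcb x hm
                          · simp at hm; simpa [hm] using hl)]
      simp

-- ===== VERDICT (by name: the statement is the Claim_ definition above) =====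
theorem split_at_h3_py_spec : Claim_equal_split_at_h3_py := by
  intro body _
  unfold Spec_split_at_h3_py split_at_h3_py split_at_h3_py_alt
  simpa using loop_eq _ [] "" [] (by simp)
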